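-- pv_equiv track=rewrite | github.com/6r1d/tagnet | lib/graph_util.py | generate_pairs
-- ===== SOURCE A (Python) =====
-- from itertools import permutations
--
-- def generate_pairs(tag_numbers):
--     """
--     Converts a list of tag numbers to list of number pairs
--     to create bidirectional graph edges.
--
--     Returns:
--
--         a list of tuples; tuples contain sorted pairs with integer tag IDs
--
--     Examples:
--         >>> generate_pairs([0, 1])
--         [(0, 1)]
--         >>> generate_pairs([1, 2])
--         [(1, 2)]
--         >>> generate_pairs([1, 2, 3])
--         [(1, 2), (1, 3), (2, 3)]
--     """
--     # Prepare an output list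
--     pairs = []
--     # Check if it's possible to build the pairs
--     if len(tag_numbers) > 1:
--         # Generate all possible permutations
--         pre_pairs = list(
--             permutations(
--                 sorted(tag_numbers), 2
--             )
--         )
--         # Remove duplicate graph edges,
--         # there's no need to connect both A->B and B->A
--         for pair in pre_pairs:
--             pair = list(sorted(pair))
--             if pair not in pairs:
--                 pairs.append(pair)
--     # Return the list of pairs for the graph edges
--     return pairs
-- ===== SOURCE B (Python) =====
-- def generate_pairs(tag_numbers):
--     """Faster rewrite: sort once, then peel off one distinct value per round —
--     emit [a, a] when a repeats, then [a, b] for each larger distinct value b."""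
--     out = []
--     rest = sorted(tag_numbers)
--     while rest:
--         a = rest[0]
--         tail = [x for x in rest if x != a]
--         if len(tail) + 1 < len(rest):
--             out.append([a, a])
--         prev = a
--         for b in tail:
--             if b != prev:
--                 out.append([a, b])
--                 prev = b
--         rest = tail
--     return out
-- ===== Notes on version B (the rewrite author's own statement) =====
-- stated objective: faster
-- what changed: Instead of materialising all n*(n-1) ordered permutations and deduplicating each sorted pair by a linear scan of the growing output list, B sorts once and peels off one distinct value per round, emitting [a,a] when the value repeats and [a,b] for each larger distinct value via an adjacent-duplicate skip.
import Mathlib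
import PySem

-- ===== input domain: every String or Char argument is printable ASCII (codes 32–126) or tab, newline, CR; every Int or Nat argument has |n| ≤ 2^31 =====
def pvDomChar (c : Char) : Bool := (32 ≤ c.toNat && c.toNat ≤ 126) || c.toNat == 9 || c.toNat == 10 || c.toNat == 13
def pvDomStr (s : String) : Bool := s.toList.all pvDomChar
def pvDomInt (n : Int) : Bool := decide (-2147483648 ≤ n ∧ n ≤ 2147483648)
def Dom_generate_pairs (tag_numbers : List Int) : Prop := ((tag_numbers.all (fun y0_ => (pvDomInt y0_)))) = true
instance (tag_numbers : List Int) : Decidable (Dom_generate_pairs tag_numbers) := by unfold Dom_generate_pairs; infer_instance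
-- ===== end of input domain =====

-- B replaces A's permutations-plus-linear-scan dedup by one sort and a per-distinct-value peeling loop (return value only; neither mutates its argument).

-- ===== PORT A =====
-- pairs = []; if len > 1: pre_pairs = list(permutations(sorted(tag_numbers), 2));
-- for pair in pre_pairs: pair = list(sorted(pair)); if pair not in pairs: pairs.append(pair)
def generate_pairs (tag_numbers : List Int) : List (List Int) :=
  if 1 < tag_numbers.length then
    let pre_pairs := PySem.List.permutations (PySem.List.sorted tag_numbers (fun x => x) false) 2
    pre_pairs.foldl (fun pairs pair =>
      let pair' := PySem.List.sorted pair (fun x => x) false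
      if pair' ∈ pairs then pairs else pairs ++ [pair']) []
  else []

-- ===== PORT B =====
-- inner for-loop of Source B: for b in tail: if b != prev: out.append([a, b]); prev = b
def bInner (a prev : Int) : List Int → List (List Int)
  | [] => []
  | b :: bs => if b ≠ prev then [a, b] :: bInner a b bs else bInner a prev bs

-- while rest: a = rest[0]; tail = [x for x in rest if x != a]; maybe [a,a]; inner loop; rest = tail
def bLoop (out : List (List Int)) (rest : List Int) : List (List Int) :=
  match rest with
  | [] => out
  | a :: r =>
    let tail := (a :: r).filter (fun x => x ≠ a)
    let out1 := if tail.length + 1 < (a :: r).length then out ++ [[a, a]] else out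
    bLoop (out1 ++ bInner a a tail) tail
termination_by rest.length
decreasing_by
  have h1 : (a :: r).filter (fun x => x ≠ a) = r.filter (fun x => x ≠ a) := by
    simp
  have h2 := List.length_filter_le (fun x => decide (x ≠ a)) r
  simp only [h1, List.length_cons]
  calc (List.filter (fun x => decide (x ≠ a)) r).length ≤ r.length := h2
    _ < r.length + 1 := Nat.lt_succ_self _

def generate_pairs_alt (tag_numbers : List Int) : List (List Int) :=
  bLoop [] (PySem.List.sorted tag_numbers (fun x => x) false)

-- ===== PRECONDITION & SPEC =====
def Spec_generate_pairs (tag_numbers : List Int) (out : List (List Int)) : Prop := out = generate_pairs_alt tag_numbers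
instance (tag_numbers : List Int) (out : List (List Int)) : Decidable (Spec_generate_pairs tag_numbers out) := by unfold Spec_generate_pairs; infer_instance

-- ===== CLAIM (what is proved, stated in full; the proofs are below) =====
def Claim_equal_generate_pairs : Prop := ∀ (tag_numbers : List Int), Dom_generate_pairs tag_numbers → Spec_generate_pairs tag_numbers (generate_pairs tag_numbers)

-- ===== LEMMAS AND PROOFS =====

-- helpers
def pyDedup {α : Type} [DecidableEq α] (acc l : List α) : List α :=
  l.foldl (fun acc x => if x ∈ acc then acc else acc ++ [x]) acc

def sort2 (p : List Int) : List Int := PySem.List.sorted p (fun x => x) false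

def perm2Go (pre : List Int) : List Int → List (List Int)
  | [] => []
  | a :: t => ((pre ++ t).map (fun y => [a, y])) ++ perm2Go (pre ++ [a]) t

theorem dd_nil {α : Type} [DecidableEq α] (acc : List α) : pyDedup acc [] = acc := rfl

theorem dd_cons {α : Type} [DecidableEq α] (acc : List α) (x : α) (l : List α) :
    pyDedup acc (x :: l) = pyDedup (if x ∈ acc then acc else acc ++ [x]) l := rfl

theorem dd_append {α : Type} [DecidableEq α] (acc l1 l2 : List α) :
    pyDedup acc (l1 ++ l2) = pyDedup (pyDedup acc l1) l2 := List.foldl_append ..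

theorem dd_prefix {α : Type} [DecidableEq α] (l : List α) : ∀ acc, ∃ r, pyDedup acc l = acc ++ r := by
  induction l with
  | nil => exact fun acc => ⟨[], by simp [dd_nil]⟩
  | cons x l ih =>
    intro acc
    rw [dd_cons]
    by_cases h : x ∈ acc
    · simpa [h] using ih acc
    · obtain ⟨r, hr⟩ := ih (acc ++ [x])
      exact ⟨x :: r, by simp [h, hr]⟩

theorem dd_mem_mono {α : Type} [DecidableEq α] {x : α} {acc : List α} (l : List α) (h : x ∈ acc) :
    x ∈ pyDedup acc l := by
  obtain ⟨r, hr⟩ := dd_prefix l acc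
  rw [hr]; exact List.mem_append_left _ h

theorem dd_skip {α : Type} [DecidableEq α] {l acc : List α} (h : ∀ x ∈ l, x ∈ acc) :
    pyDedup acc l = acc := by
  induction l with
  | nil => rfl
  | cons x l ih =>
    rw [dd_cons, if_pos (h x (by simp))]
    exact ih fun y hy => h y (by simp [hy])

theorem dd_shift {α : Type} [DecidableEq α] {l acc1 : List α} (h : ∀ x ∈ l, x ∉ acc1) :
    ∀ acc2, pyDedup (acc1 ++ acc2) l = acc1 ++ pyDedup acc2 l := by
  induction l with
  | nil => intro acc2; rfl
  | cons x l ih =>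
    intro acc2
    have hx : x ∉ acc1 := h x (by simp)
    have hmem : (x ∈ acc1 ++ acc2) = (x ∈ acc2) := by simp [hx]
    rw [dd_cons, dd_cons]
    by_cases h2 : x ∈ acc2
    · rw [if_pos (by simp [h2]), if_pos h2]; exact ih (fun y hy => h y (by simp [hy])) acc2
    · rw [if_neg (by simp [hx, h2]), if_neg h2, List.append_assoc]
      exact ih (fun y hy => h y (by simp [hy])) (acc2 ++ [x])

theorem dd_mem {α : Type} [DecidableEq α] {x : α} (l : List α) : ∀ acc,
    (x ∈ pyDedup acc l ↔ x ∈ acc ∨ x ∈ l) := by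
  induction l with
  | nil => simp [dd_nil]
  | cons y l ih =>
    intro acc
    rw [dd_cons]
    by_cases h : y ∈ acc
    · rw [if_pos h, ih]
      constructor
      · rintro (h1 | h1) <;> simp [h1]
      · rintro (h1 | h1); · simp [h1]
        rcases List.mem_cons.mp h1 with h2 | h2
        · subst h2; exact Or.inl h
        · exact Or.inr h2
    · rw [if_neg h, ih]
      constructor
      · rintro (h1 | h1)
        · rcases List.mem_append.mp h1 with h2 | h2
          · exact Or.inl h2
          · simp at h2; simp [h2]
        · simp [h1]
      · rintro (h1 | h1); · exact Or.inl (by simp [h1])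
        rcases List.mem_cons.mp h1 with h2 | h2
        · exact Or.inl (by simp [h2])
        · exact Or.inr h2

theorem dd_map_inj {α β : Type} [DecidableEq α] [DecidableEq β] {f : α → β}
    (hf : Function.Injective f) (l : List α) : ∀ acc,
    pyDedup (acc.map f) (l.map f) = (pyDedup acc l).map f := by
  induction l with
  | nil => intro acc; rfl
  | cons x l ih =>
    intro acc
    rw [List.map_cons, dd_cons, dd_cons]
    have : (f x ∈ acc.map f) ↔ (x ∈ acc) := by
      constructor
      · intro h; obtain ⟨y, hy, he⟩ := List.mem_map.mp h; rwa [← hf he]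
      · exact List.mem_map_of_mem
    by_cases h : x ∈ acc
    · rw [if_pos (this.mpr h), if_pos h]; exact ih acc
    · rw [if_neg (fun hh => h (this.mp hh)), if_neg h]
      have e : List.map f acc ++ [f x] = List.map f (acc ++ [x]) := by simp
      rw [e]; exact ih (acc ++ [x])

theorem dd_replicate {α : Type} [DecidableEq α] {x : α} {acc : List α} {k : ℕ}
    (hx : x ∉ acc) (hk : 0 < k) : pyDedup acc (List.replicate k x) = acc ++ [x] := by
  obtain ⟨k, rfl⟩ := Nat.exists_eq_succ_of_ne_zero (Nat.pos_iff_ne_zero.mp hk)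
  rw [List.replicate_succ, dd_cons, if_neg hx]
  exact dd_skip fun y hy => by simp [List.eq_of_mem_replicate hy]

theorem s2_le {a b : Int} (h : a ≤ b) : sort2 [a, b] = [a, b] :=
  PySem.List.sorted_id_eq_of_perm_of_pairwise _ _ (List.Perm.refl _) (by simp [h])

theorem s2_ge {a b : Int} (h : a ≤ b) : sort2 [b, a] = [a, b] :=
  PySem.List.sorted_id_eq_of_perm_of_pairwise _ _ (List.Perm.swap ..) (by simp [h])

theorem flat_idx (t : List Int) :
    ((List.range t.length).flatMap (fun i =>
      match t[i]? with
      | none => []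
      | some x => [[x]])) = t.map (fun y => ([y] : List Int)) := by
  induction t with
  | nil => rfl
  | cons a t ih =>
    rw [List.length_cons, List.range_succ_eq_map, List.flatMap_cons, List.flatMap_map]
    simp only [List.getElem?_cons_succ, List.getElem?_cons_zero, Nat.succ_eq_add_one]
    rw [List.map_cons]
    exact congrArg _ ih

theorem perm1 (ys : List Int) : PySem.List.permutations ys 1 = ys.map (fun y => [y]) := by
  rw [show (1:Nat) = 0+1 from rfl, PySem.List.permutations, ← flat_idx ys]
  congr 1
  funext i
  cases h : ys[i]? with
  | none => rfl
  | some v => simp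

theorem pbridge : ∀ (t pre : List Int),
    ((List.range t.length).flatMap (fun i =>
      match t[i]? with
      | none => []
      | some v => (pre ++ t.eraseIdx i).map (fun y => [v, y]))) = perm2Go pre t := by
  intro t
  induction t with
  | nil => intro pre; rfl
  | cons a t ih =>
    intro pre
    rw [List.length_cons, List.range_succ_eq_map, List.flatMap_cons, List.flatMap_map]
    simp only [List.getElem?_cons_succ, List.getElem?_cons_zero, List.eraseIdx_cons_zero,
      List.eraseIdx_cons_succ, Nat.succ_eq_add_one]
    rw [perm2Go]
    congr 1
    rw [← ih (pre ++ [a])]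
    congr 1
    funext i
    cases h : t[i]? with
    | none => rfl
    | some v => simp

theorem perm2_eq (xs : List Int) : PySem.List.permutations xs 2 = perm2Go [] xs := by
  rw [show (2:Nat) = 1+1 from rfl, PySem.List.permutations, ← pbridge xs []]
  congr 1
  funext i
  cases h : xs[i]? with
  | none => rfl
  | some v =>
    simp only [perm1, List.map_map, List.nil_append]
    rfl

theorem perm2_mem {p : List Int} : ∀ {post pre : List Int}, p ∈ perm2Go pre post →
    ∃ v y, p = [v, y] ∧ v ∈ post ∧ (y ∈ pre ∨ y ∈ post) := by
  intro post
  induction post with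
  | nil => intro pre h; simp [perm2Go] at h
  | cons a t ih =>
    intro pre h
    rw [perm2Go] at h
    rcases List.mem_append.mp h with h1 | h1
    · obtain ⟨y, hy, rfl⟩ := List.mem_map.mp h1
      rcases List.mem_append.mp hy with h2 | h2
      · exact ⟨a, y, rfl, by simp, Or.inl h2⟩
      · exact ⟨a, y, rfl, by simp, Or.inr (by simp [h2])⟩
    · obtain ⟨v, y, rfl, hv, hy⟩ := ih h1
      refine ⟨v, y, rfl, by simp [hv], ?_⟩
      rcases hy with h2 | h2
      · rcases List.mem_append.mp h2 with h3 | h3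
        · exact Or.inl h3
        · simp at h3; exact Or.inr (by simp [h3])
      · exact Or.inr (by simp [h2])

theorem split_sorted : ∀ (r : List Int) (a : Int), (a :: r).Pairwise (· ≤ ·) →
    ∃ (m : ℕ) (t : List Int), a :: r = List.replicate (m + 1) a ++ t ∧
      (a :: r).filter (fun x => x ≠ a) = t ∧ (∀ x ∈ t, a < x) ∧ t.Pairwise (· ≤ ·) := by
  intro r
  induction r with
  | nil =>
    intro a _
    exact ⟨0, [], by simp, by simp, by simp, by simp⟩
  | cons b r' ih =>
    intro a h
    have hab : a ≤ b := (List.pairwise_cons.mp h).1 b (by simp)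
    have hbr : (b :: r').Pairwise (· ≤ ·) := (List.pairwise_cons.mp h).2
    by_cases hba : b = a
    · subst hba
      obtain ⟨m, t, he, hf, hlt, hp⟩ := ih b hbr
      refine ⟨m + 1, t, ?_, ?_, hlt, hp⟩
      · rw [List.replicate_succ, List.cons_append, ← he]
      · rw [List.filter_cons, if_neg (by simp)]
        exact hf
    · have halt : a < b := lt_of_le_of_ne hab (fun he => hba he.symm)
      have hall : ∀ x ∈ b :: r', a < x := by
        intro x hx
        rcases List.mem_cons.mp hx with h2 | h2
        · simpa [h2]
        · exact lt_of_lt_of_le halt ((List.pairwise_cons.mp hbr).1 x h2)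
      refine ⟨0, b :: r', by simp, ?_, hall, hbr⟩
      rw [List.filter_cons, if_neg (by simp)]
      rw [List.filter_eq_self.mpr]
      intro x hx
      simp [Int.ne_of_gt (hall x hx)]

def eVals (prev : Int) : List Int → List Int
  | [] => []
  | b :: bs => if b ≠ prev then b :: eVals b bs else eVals prev bs

theorem binner_evals (a : Int) : ∀ (t : List Int) (prev : Int),
    bInner a prev t = (eVals prev t).map (fun b => [a, b]) := by
  intro t
  induction t with
  | nil => intro prev; rfl
  | cons b bs ih =>
    intro prev
    rw [bInner, eVals]
    by_cases h : b ≠ prev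
    · rw [if_pos h, if_pos h, List.map_cons, ih b]
    · rw [if_neg h, if_neg h, ih prev]

theorem dd_evals : ∀ (t : List Int) (prev : Int) (acc : List Int),
    t.Pairwise (· ≤ ·) → (∀ x ∈ t, prev ≤ x) → (∀ x ∈ t, (x ∈ acc ↔ x = prev)) →
    pyDedup acc t = acc ++ eVals prev t := by
  intro t
  induction t with
  | nil => intro prev acc _ _ _; simp [dd_nil, eVals]
  | cons b bs ih =>
    intro prev acc hp hle hmem
    have hbs : bs.Pairwise (· ≤ ·) := (List.pairwise_cons.mp hp).2
    by_cases h : b = prev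
    · subst h
      rw [dd_cons, if_pos ((hmem b (by simp)).mpr rfl), eVals]
      simp only [ne_eq, not_true_eq_false, ite_false]
      exact ih b acc hbs (fun x hx => (List.pairwise_cons.mp hp).1 x hx)
        (fun x hx => hmem x (by simp [hx]))
    · have hb : b ∉ acc := fun hin => h ((hmem b (by simp)).mp hin)
      rw [dd_cons, if_neg hb, eVals, if_pos h]
      have hlt : prev < b := lt_of_le_of_ne (hle b (by simp)) (fun he => h he.symm)
      rw [ih b (acc ++ [b]) hbs (fun x hx => (List.pairwise_cons.mp hp).1 x hx) ?_]
      · simp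
      · intro x hx
        have hxb : b ≤ x := (List.pairwise_cons.mp hp).1 x hx
        constructor
        · intro hin
          rcases List.mem_append.mp hin with h2 | h2
          · exact absurd ((hmem x (by simp [hx])).mp h2)
              (fun he => absurd (he ▸ hxb) (not_le.mpr hlt))
          · simpa using h2
        · intro he; simp [he]

theorem bloop_acc : ∀ (n : ℕ) (rest : List Int), rest.length ≤ n → ∀ out,
    bLoop out rest = out ++ bLoop [] rest := by
  intro n
  induction n with
  | zero =>
    intro rest h out
    rw [List.eq_nil_of_length_eq_zero (Nat.le_zero.mp h)]
    simp [bLoop]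
  | succ n ih =>
    intro rest h out
    match rest with
    | [] => simp [bLoop]
    | a :: r =>
      have hlt : ((a :: r).filter (fun x => decide (x ≠ a))).length ≤ n := by
        have h1 : (a :: r).filter (fun x => decide (x ≠ a)) = r.filter (fun x => decide (x ≠ a)) := by simp
        have h2 := List.length_filter_le (fun x => decide (x ≠ a)) r
        rw [h1]
        simp only [List.length_cons] at h
        omega
      rw [bLoop, bLoop]
      generalize hq : (a :: r).filter (fun x => decide (x ≠ a)) = q at hlt ⊢
      by_cases hc : q.length + 1 < (a :: r).length
      · rw [if_pos hc, if_pos hc,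
          ih q hlt ((out ++ [[a, a]]) ++ bInner a a q), ih q hlt (([] ++ [[a, a]]) ++ bInner a a q)]
        simp
      · rw [if_neg hc, if_neg hc, ih q hlt (out ++ bInner a a q), ih q hlt ([] ++ bInner a a q)]
        simp

theorem rows_a (a : Int) (t : List Int) (m : ℕ) : ∀ (k i : ℕ), i + k = m + 1 →
    perm2Go (List.replicate i a) (List.replicate k a ++ t) =
      (List.replicate k ((List.replicate m a ++ t).map (fun y => [a, y]))).flatten ++
        perm2Go (List.replicate (m + 1) a) t := by
  intro k
  induction k with
  | zero =>
    intro i hi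
    simp only [List.replicate_zero, List.nil_append, List.flatten_nil]
    rw [show i = m + 1 by omega]
  | succ k ih =>
    intro i hi
    rw [List.replicate_succ, List.cons_append, perm2Go]
    have e1 : List.replicate i a ++ (List.replicate k a ++ t) = List.replicate m a ++ t := by
      rw [← List.append_assoc, ← List.replicate_add, show i + k = m by omega]
    have e2 : List.replicate i a ++ [a] = List.replicate (i + 1) a := by
      rw [← List.replicate_succ']
    rw [e1, e2, ih (i + 1) (by omega)]
    simp [List.replicate_succ]

theorem srow (a : Int) {t : List Int} (hlt : ∀ x ∈ t, a < x) (m : ℕ) :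
    ((List.replicate m a ++ t).map (fun y => [a, y])).map sort2 =
      List.replicate m [a, a] ++ t.map (fun y => [a, y]) := by
  rw [List.map_map, List.map_append]
  congr 1
  · rw [List.map_replicate]
    simp [Function.comp, s2_le (le_refl a)]
  · apply List.map_congr_left
    intro y hy
    exact s2_le (le_of_lt (hlt y hy))

theorem strip (a : Int) (m : ℕ) : ∀ (post : List Int), (∀ b ∈ post, a < b) →
    ∀ (preT : List Int) (acc : List (List Int)), (∀ b ∈ post, [a, b] ∈ acc) →
    pyDedup acc ((perm2Go (List.replicate (m + 1) a ++ preT) post).map sort2) =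
      pyDedup acc ((perm2Go preT post).map sort2) := by
  intro post
  induction post with
  | nil => intro _ preT acc _; rfl
  | cons b post' ih =>
    intro hlt preT acc hacc
    have hab : a < b := hlt b (by simp)
    rw [perm2Go, perm2Go]
    simp only [List.map_append, List.map_replicate, dd_append, s2_ge (le_of_lt hab)]
    rw [dd_skip (l := List.replicate (m + 1) [a, b]) (acc := acc) (by
      intro x hx
      rw [List.eq_of_mem_replicate hx]
      exact hacc b (by simp))]
    rw [List.append_assoc]
    exact ih (fun x hx => hlt x (by simp [hx])) (preT ++ [b]) _
      (fun x hx => dd_mem_mono _ (dd_mem_mono _ (hacc x (by simp [hx]))))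

theorem mem_of_mem_sort2 {x : Int} {p : List Int} (h : x ∈ sort2 p) : x ∈ p :=
  (PySem.List.mem_sorted _ _ _ _).mp h

theorem ablock_mem {a : Int} {vt : List Int} {m : ℕ} {z : List Int}
    (h : z ∈ (if 0 < m then [[a, a]] else []) ++ vt.map (fun y => [a, y])) : a ∈ z := by
  rcases List.mem_append.mp h with h1 | h1
  · split at h1 <;> simp at h1
    simp [h1]
  · obtain ⟨y, _, rfl⟩ := List.mem_map.mp h1
    simp

theorem main : ∀ (n : ℕ) (s : List Int), s.length ≤ n → s.Pairwise (· ≤ ·) →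
    pyDedup [] ((perm2Go [] s).map sort2) = bLoop [] s := by
  intro n
  induction n with
  | zero =>
    intro s h _
    rw [List.eq_nil_of_length_eq_zero (Nat.le_zero.mp h), bLoop]
    rfl
  | succ n ih =>
    intro s hlen hp
    match s with
    | [] => rw [bLoop]; rfl
    | a :: r =>
      obtain ⟨m, t, he, hf, hlt, htp⟩ := split_sorted r a hp
      have hlent : (a :: r).length = m + 1 + t.length := by rw [he]; simp
      -- A side
      set vt : List Int := pyDedup [] t with hvt
      set ablock : List (List Int) := (if 0 < m then [[a, a]] else []) ++ vt.map (fun y => [a, y]) with hab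
      have hrows := rows_a a t m (m + 1) 0 (by omega)
      rw [List.replicate_zero] at hrows
      have hA1 : perm2Go [] (a :: r) =
          (List.replicate (m + 1) ((List.replicate m a ++ t).map (fun y => [a, y]))).flatten ++
            perm2Go (List.replicate (m + 1) a) t := by
        rw [he]; exact hrows
      -- dedup of one row
      have hrowdd : pyDedup [] (((List.replicate m a ++ t).map (fun y => [a, y])).map sort2) = ablock := by
        rw [srow a hlt m, dd_append]
        by_cases hm : 0 < m
        · rw [dd_replicate (by simp) hm, List.nil_append]
          have hsh := dd_shift (l := t.map (fun y => [a, y])) (acc1 := [[a, a]]) (by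
            intro x hx
            obtain ⟨y, hy, rfl⟩ := List.mem_map.mp hx
            simp [(hlt y hy).ne']) []
          rw [List.append_nil] at hsh
          rw [hsh, hab, if_pos hm]
          congr 1
          have := dd_map_inj (f := fun y => [a, y])
            (by intro u v huv; simpa using huv) t []
          simpa using this
        · have hm0 : m = 0 := by omega
          subst hm0
          simp only [List.replicate_zero, dd_nil]
          rw [hab]
          simp only [if_neg hm, List.nil_append]
          have := dd_map_inj (f := fun y => [a, y])
            (by intro u v huv; simpa using huv) t []
          simpa using this
      -- every element of a row's dedup input is in ablock
      have hrowmem : ∀ x ∈ ((List.replicate m a ++ t).map (fun y => [a, y])).map sort2, x ∈ ablock := by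
        intro x hx
        rw [srow a hlt m] at hx
        rcases List.mem_append.mp hx with h1 | h1
        · rw [List.eq_of_mem_replicate h1, hab]
          have hm : 0 < m := by
            rcases Nat.eq_zero_or_pos m with h0 | h0
            · rw [h0] at h1; simp at h1
            · exact h0
          simp [if_pos hm]
        · obtain ⟨y, hy, rfl⟩ := List.mem_map.mp h1
          rw [hab]
          have : y ∈ vt := by rw [hvt]; exact (dd_mem t []).mpr (Or.inr hy)
          exact List.mem_append.mpr (Or.inr (List.mem_map_of_mem this))
      -- all m+1 rows dedup to ablock
      have hflat : ∀ k, pyDedup ablock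
          (((List.replicate k ((List.replicate m a ++ t).map (fun y => [a, y]))).flatten).map sort2) = ablock := by
        intro k
        induction k with
        | zero => rfl
        | succ k ihk =>
          rw [List.replicate_succ, List.flatten_cons, List.map_append, dd_append, dd_skip hrowmem, ihk]
      have hall : pyDedup []
          (((List.replicate (m + 1) ((List.replicate m a ++ t).map (fun y => [a, y]))).flatten).map sort2) = ablock := by
        rw [List.replicate_succ, List.flatten_cons, List.map_append, dd_append, hrowdd, hflat m]
      -- strip the a-rows from the t-part
      have hstrip := strip a m t hlt [] ablock (by
        intro b hb
        rw [hab]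
        have : b ∈ vt := by rw [hvt]; exact (dd_mem t []).mpr (Or.inr hb)
        exact List.mem_append.mpr (Or.inr (List.mem_map_of_mem this)))
      rw [List.append_nil] at hstrip
      -- fresh shift
      have hfresh : pyDedup ablock ((perm2Go [] t).map sort2) =
          ablock ++ pyDedup [] ((perm2Go [] t).map sort2) := by
        have := dd_shift (l := (perm2Go [] t).map sort2) (acc1 := ablock) (by
          intro x hx hmem
          obtain ⟨p, hp, rfl⟩ := List.mem_map.mp hx
          obtain ⟨v, y, rfl, hv, hy⟩ := perm2_mem hp
          have hva : a < v := hlt v hv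
          have ha : a ∈ sort2 [v, y] := ablock_mem hmem
          have := mem_of_mem_sort2 ha
          rcases List.mem_cons.mp this with h2 | h2
          · omega
          · simp at h2
            rcases hy with h3 | h3
            · simp at h3
            · have := hlt y h3; omega) []
        rw [List.append_nil] at this
        exact this
      -- B side
      have hcond : t.length + 1 < (a :: r).length ↔ 0 < m := by
        rw [hlent]; omega
      have hbl : bLoop [] (a :: r) = ((if 0 < m then [[a, a]] else []) ++ bInner a a t) ++ bLoop [] t := by
        rw [bLoop]
        rw [hf]
        have hlt2 : t.length ≤ n := by
          simp only [List.length_cons] at hlen hlent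
          omega
        rw [bloop_acc n t hlt2]
        congr 2
        by_cases hm : 0 < m
        · rw [if_pos (hcond.mpr hm), if_pos hm]
          simp
        · rw [if_neg (fun hc => hm (hcond.mp hc)), if_neg hm]
      have hbi : bInner a a t = vt.map (fun b => [a, b]) := by
        rw [binner_evals, hvt, dd_evals t a [] htp (fun x hx => le_of_lt (hlt x hx))
          (by intro x hx; simp [(hlt x hx).ne'])]
        simp
      -- assemble
      have hIH : pyDedup [] ((perm2Go [] t).map sort2) = bLoop [] t := by
        apply ih t ?_ htp
        simp only [List.length_cons] at hlen hlent
        omega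
      rw [hA1]
      rw [List.map_append, dd_append]
      rw [hall]
      rw [hstrip]
      rw [hfresh]
      rw [hIH]
      rw [hbl]
      rw [hbi]

theorem final (xs : List Int) : generate_pairs xs = generate_pairs_alt xs := by
  unfold generate_pairs generate_pairs_alt
  have hsp : (PySem.List.sorted xs (fun x => x) false).Pairwise (· ≤ ·) :=
    PySem.List.sorted_pairwise xs (fun x => x)
  by_cases h : 1 < xs.length
  · rw [if_pos h]
    have hfold : (PySem.List.permutations (PySem.List.sorted xs (fun x => x) false) 2).foldl
        (fun pairs pair =>
          let pair' := PySem.List.sorted pair (fun x => x) false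
          if pair' ∈ pairs then pairs else pairs ++ [pair']) [] =
        pyDedup [] ((perm2Go [] (PySem.List.sorted xs (fun x => x) false)).map sort2) := by
      rw [perm2_eq, pyDedup, List.foldl_map]
      congr 1
      funext pairs pair
      simp [sort2]
    rw [hfold]
    exact main (PySem.List.sorted xs (fun x => x) false).length _ (le_refl _) hsp
  · rw [if_neg h]
    have hlen : (PySem.List.sorted xs (fun x => x) false).length ≤ 1 := by
      rw [PySem.List.length_sorted]
      omega
    match hm : PySem.List.sorted xs (fun x => x) false with
    | [] => rw [bLoop]
    | [b] =>
      rw [bLoop]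
      simp [bInner, bLoop]
    | b :: c :: s' => rw [hm] at hlen; simp at hlen

-- ===== VERDICT (by name: the statement is the Claim_ definition above) =====
theorem generate_pairs_spec : Claim_equal_generate_pairs := by
  intro tag_numbers _
  unfold Spec_generate_pairs
  exact final tag_numbers
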